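-- pv_equiv track=rewrite | github.com/kat-dearstyne/traceability-toolbox | toolbox/util/file_util.py | order_paths_by_overlap
-- ===== SOURCE A (Python) =====
-- from typing import Any, Callable, Dict, IO, List, Optional, Tuple, Type, Union
--
-- def order_paths_by_overlap(paths: List[str], reverse: bool = False) -> List[str]:
--     """
--     Orders the paths so that base paths come before any branches (e.g. root before root/dir1 before root/dir1/dir2)
--     :param paths: The list of unordered paths
--     :param reverse: If True, returns the most overlap to the least (e.g. root AFTER root/dir1 AFTEr root/dir1/dir2)
--     :return: The ordered paths
--     """
--     orderings = {}
--     for a in paths: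
--         ordered = [a]
--         for b in paths:
--             if a == b or not isinstance(a, str) or not isinstance(b, str):
--                 continue
--
--             if a in b:
--                 ordered.append(b)
--             elif b in a:
--                 ordered.insert(0, b)
--         orderings[a] = ordered
--     final_orderings = []
--     for path, ordering in orderings.items():
--         if path == ordering[0]:
--             if reverse:
--                 ordering.reverse()
--             final_orderings.extend(ordering)
--     return final_orderings
-- ===== SOURCE B (Python) =====
-- def order_paths_by_overlap(paths, reverse=False):
--     result = []
--     seen = set()
--     for a in paths:
--         if a in seen:
--             continue
--         seen.add(a)
--         if any(b != a and b in a for b in paths):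
--             continue  # a has a strict substring among the paths: not a base
--         group = [a] + [b for b in paths if b != a and a in b]
--         result.extend(reversed(group) if reverse else group)
--     return result
-- ===== Notes on version B (the rewrite author's own statement) =====
-- stated objective: simpler
-- what changed: B drops A's orderings dict and its discarded insert-at-front prefix lists: a single pass with a seen set emits, for each first-occurrence base path, the base followed by the paths it is contained in, reversing per group when requested.
import Mathlib
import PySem

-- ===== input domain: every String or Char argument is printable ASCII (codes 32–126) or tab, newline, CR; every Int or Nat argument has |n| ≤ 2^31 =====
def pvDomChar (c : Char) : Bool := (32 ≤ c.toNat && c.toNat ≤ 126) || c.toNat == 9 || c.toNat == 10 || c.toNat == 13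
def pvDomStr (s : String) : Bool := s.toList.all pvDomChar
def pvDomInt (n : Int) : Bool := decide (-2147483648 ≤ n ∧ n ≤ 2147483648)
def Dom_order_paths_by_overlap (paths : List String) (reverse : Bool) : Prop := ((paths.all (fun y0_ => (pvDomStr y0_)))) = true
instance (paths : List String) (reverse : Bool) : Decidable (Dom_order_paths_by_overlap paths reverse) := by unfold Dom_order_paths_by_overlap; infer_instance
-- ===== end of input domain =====

-- B replaces A's orderings dict and insert-at-front prefix building with a single seen-set pass
-- that emits each base's group directly (objective: simpler; same asymptotic cost).

-- ===== PORT A =====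
-- inner loop of A: ordered = [a]; append b when a in b, insert b at front when b in a
-- (the isinstance(…, str) checks are always true here: paths : List String)
def opoOrdered (paths : List String) (a : String) : List String :=
  paths.foldl (fun ordered b =>
    if a == b then ordered
    else if PySem.Str.isIn a b then ordered ++ [b]
    else if PySem.Str.isIn b a then b :: ordered
    else ordered) [a]

def order_paths_by_overlap (paths : List String) (reverse : Bool) : List String :=
  let orderings : PySem.Dict String (List String) :=
    paths.foldl (fun d a => d.insert a (opoOrdered paths a)) PySem.Dict.empty
  -- 'path == ordering[0]': ordering is never empty ([a] seeds it), so ordering[0] is its head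
  orderings.items.foldl (fun acc pr =>
    if some pr.1 = PySem.List.pyGet? pr.2 0 then
      acc ++ (if reverse then pr.2.reverse else pr.2)
    else acc) []

-- ===== PORT B =====
-- B's loop body: skip already-seen paths; emit a base's whole group at once
def opoStep (paths : List String) (reverse : Bool)
    (st : List String × PySem.Set String) (a : String) : List String × PySem.Set String :=
  if PySem.Set.contains st.2 a then st
  else
    let seen := PySem.Set.add st.2 a
    if paths.any (fun b => (!(b == a)) && PySem.Str.isIn b a) then (st.1, seen)
    else
      let group := a :: paths.filter (fun b => (!(b == a)) && PySem.Str.isIn a b)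
      (st.1 ++ (if reverse then group.reverse else group), seen)

def order_paths_by_overlap_alt (paths : List String) (reverse : Bool) : List String :=
  (paths.foldl (opoStep paths reverse) ([], PySem.Set.empty)).1

-- ===== PRECONDITION & SPEC =====
def Spec_order_paths_by_overlap (paths : List String) (reverse : Bool) (out : List String) : Prop := out = order_paths_by_overlap_alt paths reverse
instance (paths : List String) (reverse : Bool) (out : List String) : Decidable (Spec_order_paths_by_overlap paths reverse out) := by unfold Spec_order_paths_by_overlap; infer_instance

-- ===== CLAIM (what is proved, stated in full; the proofs are below) =====
def Claim_equal_order_paths_by_overlap : Prop := ∀ (paths : List String) (reverse : Bool), Dom_order_paths_by_overlap paths reverse → Spec_order_paths_by_overlap paths reverse (order_paths_by_overlap paths reverse)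

-- ===== LEMMAS AND PROOFS =====

-- b is inserted at the FRONT of a's ordering
def opoP (a b : String) : Bool := (!(a == b)) && (!(PySem.Str.isIn a b)) && PySem.Str.isIn b a
-- b is APPENDED to a's ordering
def opoQ (a b : String) : Bool := (!(a == b)) && PySem.Str.isIn a b

-- the group a base path a contributes (B's per-key emission)
def opoEmit (paths : List String) (reverse : Bool) (a : String) : List String :=
  if paths.any (fun b => (!(b == a)) && PySem.Str.isIn b a) then []
  else
    let group := a :: paths.filter (fun b => (!(b == a)) && PySem.Str.isIn a b)
    if reverse then group.reverse else group

-- first occurrences of l not yet in seen (shared shape of A's dict keys and B's seen set)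
def opoKeys : List String → List String → List String
  | [], _ => []
  | a :: l, seen => if a ∈ seen then opoKeys l seen else a :: opoKeys l (seen ++ [a])

theorem opo_isIn_antisymm (a b : String) (h1 : PySem.Str.isIn a b = true)
    (h2 : PySem.Str.isIn b a = true) : a = b := by
  rw [PySem.Str.isIn_iff_infix] at h1 h2
  exact String.toList_inj.mp (List.infix_antisymm h1 h2)

theorem opo_fold (a : String) (l : List String) : ∀ (s : List String),
    l.foldl (fun ordered b =>
      if a == b then ordered
      else if PySem.Str.isIn a b then ordered ++ [b]
      else if PySem.Str.isIn b a then b :: ordered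
      else ordered) s
    = (l.filter (opoP a)).reverse ++ s ++ l.filter (opoQ a) := by
  induction l with
  | nil => simp
  | cons b l ih =>
    intro s
    rw [List.foldl_cons, List.filter_cons, List.filter_cons]
    by_cases hab : a = b
    · have h : (a == b) = true := by simp [hab]
      have hp : opoP a b = false := by unfold opoP; rw [h]; rfl
      have hq : opoQ a b = false := by unfold opoQ; rw [h]; rfl
      rw [if_pos h, ih, hp, hq]
      simp
    · have h : (a == b) = false := by simp [hab]
      rw [if_neg (by rw [h]; exact Bool.false_ne_true)]
      by_cases h1 : PySem.Str.isIn a b = true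
      · have hp : opoP a b = false := by unfold opoP; rw [h1]; simp
        have hq : opoQ a b = true := by unfold opoQ; rw [h1, h]; rfl
        rw [if_pos h1, ih, hp, hq]
        simp
      · have h1' : PySem.Str.isIn a b = false := Bool.eq_false_iff.mpr h1
        rw [if_neg h1]
        by_cases h2 : PySem.Str.isIn b a = true
        · have hp : opoP a b = true := by unfold opoP; rw [h1', h2, h]; rfl
          have hq : opoQ a b = false := by unfold opoQ; rw [h1']; simp
          rw [if_pos h2, ih, hp, hq]
          simp
        · have h2' : PySem.Str.isIn b a = false := Bool.eq_false_iff.mpr h2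
          have hp : opoP a b = false := by unfold opoP; rw [h2']; simp
          have hq : opoQ a b = false := by unfold opoQ; rw [h1']; simp
          rw [if_neg h2, ih, hp, hq]
          simp

theorem opoOrdered_eq (paths : List String) (a : String) :
    opoOrdered paths a
      = (paths.filter (opoP a)).reverse ++ a :: paths.filter (opoQ a) := by
  unfold opoOrdered
  rw [opo_fold]
  simp

-- A's front-insert predicate coincides with B's strict-substring guard predicate
theorem opoP_eq (a b : String) :
    opoP a b = ((!(b == a)) && PySem.Str.isIn b a) := by
  by_cases hab : a = b
  · subst hab; simp [opoP]
  · have hab' : (a == b) = false := by simp [hab]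
    have hba : (b == a) = false := by simp [Ne.symm hab]
    unfold opoP
    rw [hab', hba]
    cases h2 : PySem.Str.isIn b a
    · simp
    · have h1 : PySem.Str.isIn a b = false :=
        Bool.eq_false_iff.mpr (fun h1 => hab (opo_isIn_antisymm a b h1 h2))
      rw [h1]
      rfl

theorem opoQ_eq (a b : String) :
    opoQ a b = ((!(b == a)) && PySem.Str.isIn a b) := by
  unfold opoQ
  rw [Bool.beq_comm]

theorem opo_pyGet_zero {α : Type} (x : α) (xs : List α) :
    PySem.List.pyGet? (x :: xs) 0 = some x := by
  simp [PySem.List.pyGet?, PySem.List.pyIdx?]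

-- per-key: A's "path == ordering[0] → extend" contributes exactly B's emitted group
theorem opo_step_emit (paths : List String) (reverse : Bool) (a : String) :
    (if some a = PySem.List.pyGet? (opoOrdered paths a) 0 then
        (if reverse then (opoOrdered paths a).reverse else opoOrdered paths a)
      else [])
    = opoEmit paths reverse a := by
  rw [opoOrdered_eq]
  have hfilter : paths.filter (opoP a) = paths.filter (fun b => (!(b == a)) && PySem.Str.isIn b a) :=
    List.filter_congr (fun b _ => opoP_eq a b)
  have hq : paths.filter (opoQ a) = paths.filter (fun b => (!(b == a)) && PySem.Str.isIn a b) :=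
    List.filter_congr (fun b _ => opoQ_eq a b)
  cases hp : paths.filter (opoP a) with
  | nil =>
    have hany : paths.any (fun b => (!(b == a)) && PySem.Str.isIn b a) = false := by
      rw [List.any_eq_false]
      intro b hb hball
      have : b ∈ paths.filter (opoP a) := List.mem_filter.mpr ⟨hb, (opoP_eq a b) ▸ hball⟩
      rw [hp] at this
      exact absurd this (List.not_mem_nil)
    rw [List.reverse_nil, List.nil_append, opo_pyGet_zero, if_pos rfl, hq]
    unfold opoEmit
    rw [hany, if_neg Bool.false_ne_true]
  | cons c rest =>
    have hany : paths.any (fun b => (!(b == a)) && PySem.Str.isIn b a) = true := by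
      have hc : c ∈ paths.filter (opoP a) := by rw [hp]; exact List.mem_cons_self
      rw [List.any_eq_true]
      exact ⟨c, (List.mem_filter.mp hc).1, (opoP_eq a c) ▸ (List.mem_filter.mp hc).2⟩
    obtain ⟨x, xs, hx⟩ := List.exists_cons_of_ne_nil (by simp : (c :: rest).reverse ≠ [])
    have hxmem : x ∈ paths.filter (opoP a) := by
      rw [hp, ← List.mem_reverse, hx]
      exact List.mem_cons_self
    have hxa : a ≠ x := by
      have := (List.mem_filter.mp hxmem).2
      unfold opoP at this
      intro h
      rw [← h] at this
      simp at this
    have hne : ¬ (some a = PySem.List.pyGet? ((c :: rest).reverse ++ a :: paths.filter (opoQ a)) 0) := by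
      rw [hx, List.cons_append, opo_pyGet_zero]
      intro h
      exact hxa (Option.some.inj h)
    rw [if_neg hne]
    unfold opoEmit
    rw [hany, if_pos rfl]

-- A's dict loop: items collect first occurrences with their computed ordering
theorem opo_items (g : String → List String) (l : List String) :
    ∀ (d : PySem.Dict String (List String)), (∀ p ∈ d.items, p.2 = g p.1) →
      (l.foldl (fun d a => d.insert a (g a)) d).items
        = d.items ++ (opoKeys l d.keys).map (fun a => (a, g a)) := by
  induction l with
  | nil => intro d _; simp [opoKeys]
  | cons a l ih =>
    intro d hd
    by_cases hmem : a ∈ d.keys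
    · have hcont : d.contains a = true := by
        rw [PySem.Dict.contains_eq_decide_mem_keys]; simpa using hmem
      have hitems : (d.insert a (g a)).items = d.items := by
        rw [PySem.Dict.items_insert_of_contains d (g a) hcont]
        refine (List.map_congr_left ?_).trans (List.map_id _)
        intro p hp
        by_cases hpa : p.1 = a
        · have h1 : (p.1 == a) = true := by simp [hpa]
          rw [if_pos h1, ← hpa, ← hd p hp]
          rfl
        · have h1 : (p.1 == a) = false := by simp [hpa]
          rw [if_neg (by rw [h1]; exact Bool.false_ne_true)]
          rfl
      have hde : d.insert a (g a) = d := by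
        calc d.insert a (g a) = ⟨(d.insert a (g a)).items⟩ := rfl
          _ = ⟨d.items⟩ := by rw [hitems]
          _ = d := rfl
      simp only [List.foldl_cons, hde, opoKeys, if_pos hmem]
      exact ih d hd
    · have hcont : d.contains a = false := by
        rw [PySem.Dict.contains_eq_decide_mem_keys]; simpa using hmem
      have hitems := PySem.Dict.items_insert_of_not_contains d (g a) hcont
      have hkeys := PySem.Dict.keys_insert_of_not_contains d (g a) hcont
      have hd' : ∀ p ∈ (d.insert a (g a)).items, p.2 = g p.1 := by
        intro p hp
        rw [hitems] at hp
        rcases List.mem_append.mp hp with h | h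
        · exact hd p h
        · simp at h; simp [h]
      simp only [List.foldl_cons, opoKeys, if_neg hmem]
      rw [ih _ hd', hitems, hkeys]
      simp

-- A's final loop over the items, rewritten through opoEmit
theorem opo_final (paths : List String) (reverse : Bool) (ks : List String) :
    ∀ (acc : List String),
      (ks.map (fun a => (a, opoOrdered paths a))).foldl (fun acc pr =>
          if some pr.1 = PySem.List.pyGet? pr.2 0 then
            acc ++ (if reverse then pr.2.reverse else pr.2)
          else acc) acc
      = acc ++ ks.flatMap (opoEmit paths reverse) := by
  induction ks with
  | nil => intro acc; simp
  | cons a ks ih =>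
    intro acc
    simp only [List.map_cons, List.foldl_cons, List.flatMap_cons]
    rw [ih]
    by_cases h : some a = PySem.List.pyGet? (opoOrdered paths a) 0
    · rw [if_pos h, ← opo_step_emit paths reverse a, if_pos h, List.append_assoc]
    · rw [if_neg h, ← opo_step_emit paths reverse a, if_neg h]
      simp

-- B's single pass: the seen set realises the same first-occurrence traversal
theorem opo_alt_fold (paths : List String) (reverse : Bool) (l : List String) :
    ∀ (res : List String) (seen : PySem.Set String),
      (l.foldl (opoStep paths reverse) (res, seen)).1
      = res ++ (opoKeys l seen).flatMap (opoEmit paths reverse) := by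
  induction l with
  | nil => intro res seen; simp [opoKeys]
  | cons a l ih =>
    intro res seen
    rw [List.foldl_cons]
    by_cases hmem : a ∈ seen
    · have hcont : PySem.Set.contains seen a = true := (PySem.Set.contains_iff seen a).mpr hmem
      have hstep : opoStep paths reverse (res, seen) a = (res, seen) := by
        unfold opoStep
        simp only []
        rw [if_pos hcont]
      rw [hstep, ih res seen]
      simp only [opoKeys, if_pos hmem]
    · have hcont : PySem.Set.contains seen a = false := by
        cases hc : PySem.Set.contains seen a
        · rfl
        · exact absurd ((PySem.Set.contains_iff seen a).mp hc) hmem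
      have hadd : PySem.Set.add seen a = seen ++ [a] := by
        unfold PySem.Set.add
        rw [if_neg (by rw [hcont]; exact Bool.false_ne_true)]
      by_cases hany : paths.any (fun b => (!(b == a)) && PySem.Str.isIn b a) = true
      · have hstep : opoStep paths reverse (res, seen) a = (res, seen ++ [a]) := by
          unfold opoStep
          simp only []
          rw [if_neg (by rw [hcont]; exact Bool.false_ne_true), if_pos hany, hadd]
        rw [hstep, ih res (seen ++ [a])]
        simp only [opoKeys, if_neg hmem, List.flatMap_cons]
        unfold opoEmit
        rw [hany, if_pos rfl, List.nil_append]
      · have hany' : paths.any (fun b => (!(b == a)) && PySem.Str.isIn b a) = false :=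
          Bool.eq_false_iff.mpr hany
        have hstep : opoStep paths reverse (res, seen) a
            = (res ++ (if reverse then (a :: paths.filter (fun b => (!(b == a)) && PySem.Str.isIn a b)).reverse
                       else a :: paths.filter (fun b => (!(b == a)) && PySem.Str.isIn a b)), seen ++ [a]) := by
          unfold opoStep
          simp only []
          rw [if_neg (by rw [hcont]; exact Bool.false_ne_true), if_neg hany, hadd]
        rw [hstep, ih _ (seen ++ [a])]
        simp only [opoKeys, if_neg hmem, List.flatMap_cons]
        unfold opoEmit
        rw [hany', if_neg Bool.false_ne_true, List.append_assoc]

-- ===== VERDICT (by name: the statement is the Claim_ definition above) =====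
theorem order_paths_by_overlap_spec : Claim_equal_order_paths_by_overlap := by
  intro paths reverse _
  unfold Spec_order_paths_by_overlap order_paths_by_overlap order_paths_by_overlap_alt
  rw [opo_alt_fold paths reverse paths [] PySem.Set.empty]
  have hitems := opo_items (opoOrdered paths) paths PySem.Dict.empty (by intro p hp; exact absurd hp List.not_mem_nil)
  simp only [hitems]
  have : (PySem.Dict.empty : PySem.Dict String (List String)).items = [] := rfl
  rw [this, List.nil_append]
  have hkeys : (PySem.Dict.empty : PySem.Dict String (List String)).keys = [] := rfl
  rw [hkeys, opo_final paths reverse (opoKeys paths []) []]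
  rfl
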